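-- pv_equiv track=rewrite | github.com/korshikovvital/career | backend/company/models.py | get_levels_dict
-- ===== SOURCE A (Python) =====
-- from typing import Dict, List, Optional, Union
--
-- def get_levels_dict(levels: List[str]) -> Dict[str, List[int]]:
--     """Собираем уровни в словарь вида {'alpha_prefix': [num_suffix1, num_suffix2, ...], ...}
--     НЕ УЧИТЫВАЕТ УРОВНИ БОЛЬШЕ 9!
--     Пример:
--     levels = ['П2', 'П3', 'П4', 'МП2', 'МП3'] =>
--     => levels_dict = {'МП': [2, 3], 'П': [2, 3, 4]}
--     """
--
--     levels_dict = {}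
--     # TODO НЕ УЧИТЫВАЕТ УРОВНИ БОЛЬШЕ 9, потенциальная доработка, хотя пока нет уровней выше 9
--     # Сортируем уровни по числовому значению, чтобы списки в levels_dict.values() были отсортированы по возрастанию
--     # а также убираем дубли в списке
--     levels = list(set(levels))
--     levels.sort(key=lambda lvl: lvl[-1])
--     for level in levels:
--         # TODO НЕ УЧИТЫВАЕТ УРОВНИ БОЛЬШЕ 9, потенциальная доработка, хотя пока нет уровней выше 9
--         alpha_part = level[:-1]
--         num_part = int(level[-1])
--         if alpha_part not in levels_dict:
--             levels_dict[alpha_part] = []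
--         levels_dict[alpha_part].append(num_part)
--     return levels_dict
-- ===== SOURCE B (Python) =====
-- def get_levels_dict(levels):
--     """Bucket pass over the 10 possible digit suffixes instead of a global comparison sort:
--     split each deduplicated level once into (prefix, num), then for each digit 0..9 scan the
--     pairs and append the digit to its prefix's bucket, so every bucket comes out ascending
--     without any sort call."""
--     pairs = [(level[:-1], int(level[-1])) for level in set(levels)]
--     levels_dict = {}
--     for digit in range(10):
--         for prefix, num in pairs:
--             if num == digit:
--                 levels_dict.setdefault(prefix, []).append(digit)
--     return levels_dict
-- ===== Notes on version B (the rewrite author's own statement) =====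
-- stated objective: alternative
-- what changed: A sorts the deduplicated levels globally by their last character and then groups them in one loop; B splits each deduplicated level once into (prefix, int(suffix)) pairs and then makes one bucket pass per possible digit suffix (0..9), appending the digit to its prefix's list, so each bucket comes out ascending by construction with no sort call.
import Mathlib
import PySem

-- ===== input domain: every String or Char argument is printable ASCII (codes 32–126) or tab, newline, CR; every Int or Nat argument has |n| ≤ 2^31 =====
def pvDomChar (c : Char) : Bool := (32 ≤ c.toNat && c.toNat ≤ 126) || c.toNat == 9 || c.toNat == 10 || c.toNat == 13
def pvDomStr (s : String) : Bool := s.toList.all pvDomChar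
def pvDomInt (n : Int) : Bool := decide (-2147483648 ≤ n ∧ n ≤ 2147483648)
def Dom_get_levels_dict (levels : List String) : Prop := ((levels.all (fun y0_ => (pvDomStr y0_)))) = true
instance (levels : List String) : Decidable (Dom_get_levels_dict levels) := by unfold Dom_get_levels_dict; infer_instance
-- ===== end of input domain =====

-- B replaces A's global stable sort of the deduplicated levels by one (prefix, num) split pass
-- followed by a bucket pass over the ten possible digit suffixes (for each digit, one scan
-- appending it to its prefix's list), so the buckets come out ascending with no sort call.


-- ===== PORT A =====
-- lvl[-1]; the ' ' default is unreachable under Pre_ (Python raises IndexError on an empty level)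
def keyOf (s : String) : Char := (PySem.Str.pyGet? s (-1)).getD ' '

-- the loop body of A: alpha_part = level[:-1]; num_part = int(level[-1]) (ValueError excluded by
-- Pre_, hence the .getD 0 default is unreachable); the 'if not in' insert; the append
def stepA (d : PySem.Dict String (List Int)) (level : String) : PySem.Dict String (List Int) :=
  let alpha := PySem.Str.slice level none (some (-1))
  let num := (PySem.Int.ofChars? [keyOf level]).getD 0
  let d' := if d.contains alpha then d else d.insert alpha ([] : List Int)
  d'.modify alpha ([] : List Int) (fun l => l ++ [num])

def get_levels_dict (levels : List String) : List (String × List Int) :=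
  -- levels = list(set(levels)); levels.sort(key=lambda lvl: lvl[-1]); then the for loop
  ((PySem.List.sorted (PySem.Set.ofList levels) keyOf false).foldl stepA PySem.Dict.empty).items

-- ===== PORT B =====
-- the inner loop body of B: if num == digit: levels_dict.setdefault(prefix, []).append(digit)
-- (setdefault-then-append-in-place = Dict.modify with default [])
def stepB (digit : Int) (d : PySem.Dict String (List Int)) (p : String × Int) : PySem.Dict String (List Int) :=
  if p.2 == digit then
    d.modify p.1 ([] : List Int) (fun l => l ++ [digit])
  else d

def get_levels_dict_alt (levels : List String) : List (String × List Int) :=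
  -- pairs = [(level[:-1], int(level[-1])) for level in set(levels)]; the .getD defaults are
  -- unreachable where Python returns (IndexError / ValueError on a level without digit end)
  let pairs := (PySem.Set.ofList levels).map (fun level =>
    (PySem.Str.slice level none (some (-1)),
     (PySem.Int.ofChars? [(PySem.Str.pyGet? level (-1)).getD ' ']).getD 0))
  (((PySem.List.pyRange 0 10 1).foldl
      (fun d digit => pairs.foldl (stepB digit) d) PySem.Dict.empty)).items

-- ===== PRECONDITION & SPEC =====
-- Pre_ admits exactly the inputs A returns on: every level must be nonempty with a decimal-digit
-- last character, otherwise Python's lvl[-1] / int(lvl[-1]) raises IndexError / ValueError.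
def Pre_get_levels_dict (levels : List String) : Prop :=
  levels.all (fun s => (PySem.Str.pyGet? s (-1)).any Char.isDigit) = true
instance (levels : List String) : Decidable (Pre_get_levels_dict levels) := by
  unfold Pre_get_levels_dict; infer_instance

def pvWitness_get_levels_dict : List String := ["MP2", "P3", "P2", "P3", "2"]

def Spec_get_levels_dict (levels : List String) (out : List (String × List Int)) : Prop :=
  out = get_levels_dict_alt levels
instance (levels : List String) (out : List (String × List Int)) : Decidable (Spec_get_levels_dict levels out) := by
  unfold Spec_get_levels_dict; infer_instance

-- ===== CLAIM (what is proved, stated in full; the proofs are below) =====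
def Claim_equal_get_levels_dict : Prop := ∀ (levels : List String), Dom_get_levels_dict levels → Pre_get_levels_dict levels → Spec_get_levels_dict levels (get_levels_dict levels)

-- ===== LEMMAS AND PROOFS =====

lemma char_eq_of_toNat {c d : Char} (h : c.toNat = d.toNat) : c = d :=
  Char.ext (UInt32.toNat_inj.mp h)

def digitChars : List Char := ['0','1','2','3','4','5','6','7','8','9']

lemma mem_digitChars (c : Char) (h : c.isDigit = true) : c ∈ digitChars := by
  simp [Char.isDigit] at h
  obtain ⟨h1, h2⟩ := h
  have hb1 : 48 ≤ c.toNat := UInt32.le_iff_toNat_le.mp h1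
  have hb2 : c.toNat ≤ 57 := UInt32.le_iff_toNat_le.mp h2
  have hd : c.toNat = 48 ∨ c.toNat = 49 ∨ c.toNat = 50 ∨ c.toNat = 51 ∨ c.toNat = 52 ∨
      c.toNat = 53 ∨ c.toNat = 54 ∨ c.toNat = 55 ∨ c.toNat = 56 ∨ c.toNat = 57 := by omega
  rcases hd with h|h|h|h|h|h|h|h|h|h <;>
  · first
    | (have hc : c = '0' := char_eq_of_toNat (by rw [h]; rfl); simp [hc, digitChars])
    | (have hc : c = '1' := char_eq_of_toNat (by rw [h]; rfl); simp [hc, digitChars])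
    | (have hc : c = '2' := char_eq_of_toNat (by rw [h]; rfl); simp [hc, digitChars])
    | (have hc : c = '3' := char_eq_of_toNat (by rw [h]; rfl); simp [hc, digitChars])
    | (have hc : c = '4' := char_eq_of_toNat (by rw [h]; rfl); simp [hc, digitChars])
    | (have hc : c = '5' := char_eq_of_toNat (by rw [h]; rfl); simp [hc, digitChars])
    | (have hc : c = '6' := char_eq_of_toNat (by rw [h]; rfl); simp [hc, digitChars])
    | (have hc : c = '7' := char_eq_of_toNat (by rw [h]; rfl); simp [hc, digitChars])
    | (have hc : c = '8' := char_eq_of_toNat (by rw [h]; rfl); simp [hc, digitChars])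
    | (have hc : c = '9' := char_eq_of_toNat (by rw [h]; rfl); simp [hc, digitChars])

-- stable insertion: x goes after everything not strictly greater, before everything strictly greater
lemma insertBy_append_cons {α : Type} (before : α → α → Bool) (x : α) (l1 l2 : List α)
    (h1 : ∀ y ∈ l1, before x y = false) (h2 : ∀ y ∈ l2, before x y = true) :
    PySem.List.insertBy before x (l1 ++ l2) = l1 ++ x :: l2 := by
  induction l1 with
  | nil =>
    cases l2 with
    | nil => rfl
    | cons z zs => simp [PySem.List.insertBy, h2 z (by simp)]
  | cons a l1 ih =>
    have ha : before x a = false := h1 a (by simp)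
    simp only [List.cons_append, PySem.List.insertBy, ha, Bool.false_eq_true, if_false]
    rw [ih (fun y hy => h1 y (by simp [hy]))]

lemma flatMap_congr_mem {α β : Type} (l : List α) (f g : α → List β)
    (h : ∀ a ∈ l, f a = g a) : l.flatMap f = l.flatMap g := by
  simp only [List.flatMap]
  rw [List.map_congr_left h]

-- the stable sort by key is the concatenation of the key-buckets, in increasing key order
lemma sorted_eq_flatMap_filter {α : Type} (key : α → Char) (ks : List Char)
    (hks : ks.Pairwise (· < ·)) (xs : List α) (hxs : ∀ x ∈ xs, key x ∈ ks) :
    PySem.List.sorted xs key false = ks.flatMap (fun k => xs.filter (fun x => key x == k)) := by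
  induction xs using List.reverseRecOn with
  | nil => simp [PySem.List.sorted]
  | append_singleton xs x ih =>
    have hsorted : ∀ (ys : List α), PySem.List.sorted (ys ++ [x]) key false
        = PySem.List.insertBy (fun a b => decide (key a < key b)) x (PySem.List.sorted ys key false) := by
      intro ys
      rw [PySem.List.sorted_eq_foldl_insertBy, PySem.List.sorted_eq_foldl_insertBy, List.foldl_append]
      rfl
    rw [hsorted, ih (fun y hy => hxs y (by simp [hy]))]
    obtain ⟨s, t, rfl⟩ := List.append_of_mem (hxs x (by simp))
    have hp := hks
    rw [List.pairwise_append] at hp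
    obtain ⟨hs, ht', hst⟩ := hp
    rw [List.pairwise_cons] at ht'
    obtain ⟨htgt, ht⟩ := ht'
    have hslt : ∀ k ∈ s, k < key x := fun k hk => hst k hk (key x) (by simp)
    rw [List.flatMap_append, List.flatMap_cons]
    rw [show (List.flatMap (fun k => xs.filter (fun y => key y == k)) s)
          ++ (xs.filter (fun y => key y == key x)
              ++ List.flatMap (fun k => xs.filter (fun y => key y == k)) t)
        = ((List.flatMap (fun k => xs.filter (fun y => key y == k)) s)
            ++ xs.filter (fun y => key y == key x))
          ++ List.flatMap (fun k => xs.filter (fun y => key y == k)) t by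
      simp [List.append_assoc]]
    rw [insertBy_append_cons _ x _ _ ?h1 ?h2]
    case h1 =>
      intro y hy
      simp only [List.mem_append, List.mem_flatMap, List.mem_filter] at hy
      rcases hy with ⟨k, hk, _, hky⟩ | ⟨_, hky⟩
      · have : key y = k := by simpa using hky
        simp [this, not_lt.mpr (le_of_lt (hslt k hk))]
      · have : key y = key x := by simpa using hky
        simp [this]
    case h2 =>
      intro y hy
      simp only [List.mem_flatMap, List.mem_filter] at hy
      obtain ⟨k, hk, _, hky⟩ := hy
      have : key y = k := by simpa using hky
      simp [this, htgt k hk]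
    rw [List.flatMap_append, List.flatMap_cons]
    have hfilts : ∀ k ∈ s, (xs ++ [x]).filter (fun y => key y == k) = xs.filter (fun y => key y == k) := by
      intro k hk
      rw [List.filter_append]
      have : key x ≠ k := ne_of_gt (hslt k hk)
      simp [this]
    have hfiltt : ∀ k ∈ t, (xs ++ [x]).filter (fun y => key y == k) = xs.filter (fun y => key y == k) := by
      intro k hk
      rw [List.filter_append]
      have : key x ≠ k := ne_of_lt (htgt k hk)
      simp [this]
    have hfiltx : (xs ++ [x]).filter (fun y => key y == key x)
        = xs.filter (fun y => key y == key x) ++ [x] := by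
      rw [List.filter_append]; simp
    rw [flatMap_congr_mem s _ _ (fun k hk => hfilts k hk),
        flatMap_congr_mem t _ _ (fun k hk => hfiltt k hk), hfiltx]
    simp [List.append_assoc]

lemma insert_insert_of_not_contains {κ ν : Type} [BEq κ] [LawfulBEq κ] (d : PySem.Dict κ ν) (a : κ) (v w : ν)
    (h : d.contains a = false) : (d.insert a v).insert a w = d.insert a w := by
  unfold PySem.Dict.insert PySem.Dict.contains at *
  have hall : ∀ p ∈ d.items, (p.1 == a) = false := by
    simpa [List.any_eq_false] using h
  simp only [h, Bool.false_eq_true, if_false]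
  have hc2 : ((d.items ++ [(a, v)]).any fun p => p.1 == a) = true := by
    simp [List.any_append]
  simp only [hc2, if_true]
  congr 1
  rw [List.map_append]
  have hid : (d.items.map fun p => if (p.1 == a) = true then (a, w) else p) = d.items := by
    rw [List.map_congr_left (g := id) (fun p hp => by simp [hall p hp])]
    simp
  rw [hid]
  simp

-- A's body (the membership test, the empty-list insert and the append) is one Dict.modify
lemma stepA_eq_modify (d : PySem.Dict String (List Int)) (level : String) :
    stepA d level = d.modify (PySem.Str.slice level none (some (-1))) []
      (fun l => l ++ [(PySem.Int.ofChars? [keyOf level]).getD 0]) := by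
  unfold stepA PySem.Dict.modify
  by_cases h : PySem.Dict.contains d (PySem.Str.slice level none (some (-1))) = true
  · simp only [h, if_true]
  · rw [Bool.not_eq_true] at h
    simp only [h, Bool.false_eq_true, if_false]
    rw [PySem.Dict.getD_insert_self]
    rw [insert_insert_of_not_contains d _ _ _ h]
    have hg : d.getD (PySem.Str.slice level none (some (-1))) [] = [] := by
      unfold PySem.Dict.getD
      rw [(PySem.Dict.get?_eq_none_iff_contains d _).mpr h]
      rfl
    rw [hg]

-- int(c) for a single decimal-digit character
lemma digit_val (k : Char) (hk : k.isDigit = true) :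
    PySem.Int.ofChars? [k] = some ((k.toNat : Int) - 48) := by
  have hm := mem_digitChars k hk
  fin_cases hm <;> decide

-- one digit's scan of B equals A's fold over that digit's bucket
lemma chunk (S : List String) (hS : ∀ s ∈ S, (PySem.Str.pyGet? s (-1)).any Char.isDigit = true)
    (n : Int) (c : Char) (hcd : c.isDigit = true) (h2 : PySem.Int.ofChars? [c] = some n)
    (d : PySem.Dict String (List Int)) :
    (S.map (fun level => (PySem.Str.slice level none (some (-1)),
        (PySem.Int.ofChars? [(PySem.Str.pyGet? level (-1)).getD ' ']).getD 0))).foldl (stepB n) d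
      = (S.filter (fun x => keyOf x == c)).foldl stepA d := by
  rw [List.foldl_map]
  have hstep : ∀ (acc : PySem.Dict String (List Int)), ∀ s ∈ S,
      stepB n acc (PySem.Str.slice s none (some (-1)),
          (PySem.Int.ofChars? [(PySem.Str.pyGet? s (-1)).getD ' ']).getD 0)
        = if (keyOf s == c) = true then stepA acc s else acc := by
    intro acc s hs
    obtain ⟨k, hk, hkd⟩ : ∃ k, PySem.Str.pyGet? s (-1) = some k ∧ k.isDigit = true := by
      have := hS s hs
      cases hg : PySem.Str.pyGet? s (-1) with
      | none => rw [hg] at this; simp [Option.any] at this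
      | some k => rw [hg] at this; exact ⟨k, rfl, by simpa [Option.any] using this⟩
    have hkey : (PySem.Str.pyGet? s (-1)).getD ' ' = keyOf s := rfl
    have hkeyk : keyOf s = k := by unfold keyOf; rw [hk]; rfl
    have hn : n = (c.toNat : Int) - 48 := by
      have := digit_val c hcd
      rw [h2] at this
      exact Option.some_inj.mp this
    have hcond : ((PySem.Int.ofChars? [(PySem.Str.pyGet? s (-1)).getD ' ']).getD 0 == n)
        = (keyOf s == c) := by
      rw [hkey, hkeyk, digit_val k hkd, hn]
      by_cases hkc : k = c
      · simp [hkc]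
      · have hne : k.toNat ≠ c.toNat := fun h => hkc (char_eq_of_toNat h)
        have h1 : ((k.toNat : Int) - 48 == (c.toNat : Int) - 48) = false := by
          simp only [beq_eq_false_iff_ne, ne_eq]
          omega
        have h2' : (k == c) = false := by simp [hkc]
        rw [Option.getD_some, h1, h2']
    unfold stepB
    simp only [hcond]
    by_cases hc : (keyOf s == c) = true
    · rw [if_pos hc, if_pos hc, stepA_eq_modify]
      have : (PySem.Int.ofChars? [keyOf s]).getD 0 = n := by
        rw [show keyOf s = c from by simpa using hc, h2]; rfl
      rw [this]
    · rw [if_neg hc, if_neg hc]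
  rw [PySem.List.foldl_congr_mem S _ _ d hstep]
  rw [List.foldl_filter]

-- ===== VERDICT (by name: the statement is the Claim_ definition above) =====
theorem get_levels_dict_spec : Claim_equal_get_levels_dict := by
  intro levels _ hpre
  unfold Spec_get_levels_dict get_levels_dict get_levels_dict_alt
  have hS : ∀ s ∈ PySem.Set.ofList levels,
      (PySem.Str.pyGet? s (-1)).any Char.isDigit = true := by
    intro s hs
    have hmem : s ∈ levels := (PySem.Set.mem_ofList levels s).mp hs
    unfold Pre_get_levels_dict at hpre
    rw [List.all_eq_true] at hpre
    exact hpre s hmem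
  have hmemk : ∀ x ∈ PySem.Set.ofList levels, keyOf x ∈ digitChars := by
    intro x hx
    have := hS x hx
    cases hg : PySem.Str.pyGet? x (-1) with
    | none => rw [hg] at this; simp [Option.any] at this
    | some k =>
      rw [hg] at this
      have hkd : k.isDigit = true := by simpa [Option.any] using this
      have : keyOf x = k := by unfold keyOf; rw [hg]; rfl
      rw [this]
      exact mem_digitChars k hkd
  rw [sorted_eq_flatMap_filter keyOf digitChars (by decide) _ hmemk]
  rw [show PySem.List.pyRange 0 10 1 = [0,1,2,3,4,5,6,7,8,9] from by decide]
  simp only [digitChars, List.flatMap_cons, List.flatMap_nil, List.append_nil,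
    List.foldl_append, List.foldl_cons, List.foldl_nil]
  rw [chunk _ hS 0 '0' (by decide) (by decide), chunk _ hS 1 '1' (by decide) (by decide),
      chunk _ hS 2 '2' (by decide) (by decide), chunk _ hS 3 '3' (by decide) (by decide),
      chunk _ hS 4 '4' (by decide) (by decide), chunk _ hS 5 '5' (by decide) (by decide),
      chunk _ hS 6 '6' (by decide) (by decide), chunk _ hS 7 '7' (by decide) (by decide),
      chunk _ hS 8 '8' (by decide) (by decide), chunk _ hS 9 '9' (by decide) (by decide)]
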